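-- pv_equiv track=rewrite | github.com/psibladesabuzer/restaraunt | app.py | resolve_menu_item
-- ===== SOURCE A (Python) =====
-- def resolve_menu_item(menu_lookup, dish_name):
--     normalized = dish_name.strip().casefold()
--     for name, price in menu_lookup.items():
--         if name.casefold() == normalized:
--             return name, price
--     for name, price in menu_lookup.items():
--         if normalized and normalized in name.casefold():
--             return name, price
--     return None, None
-- ===== SOURCE B (Python) =====
-- def resolve_menu_item(menu_lookup, dish_name):
--     normalized = dish_name.strip().casefold()
--     candidate = None
--     for name, price in menu_lookup.items():
--         folded = name.casefold()
--         if folded == normalized: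
--             return name, price
--         if candidate is None and normalized and normalized in folded:
--             candidate = (name, price)
--     return candidate if candidate is not None else (None, None)
-- ===== Notes on version B (the rewrite author's own statement) =====
-- stated objective: alternative
-- what changed: Replaces A's two passes over the menu (exact scan, then substring scan) with a single pass that casefolds each name once, returns an exact match eagerly and keeps the first substring match as a post-loop candidate.
import Mathlib
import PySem

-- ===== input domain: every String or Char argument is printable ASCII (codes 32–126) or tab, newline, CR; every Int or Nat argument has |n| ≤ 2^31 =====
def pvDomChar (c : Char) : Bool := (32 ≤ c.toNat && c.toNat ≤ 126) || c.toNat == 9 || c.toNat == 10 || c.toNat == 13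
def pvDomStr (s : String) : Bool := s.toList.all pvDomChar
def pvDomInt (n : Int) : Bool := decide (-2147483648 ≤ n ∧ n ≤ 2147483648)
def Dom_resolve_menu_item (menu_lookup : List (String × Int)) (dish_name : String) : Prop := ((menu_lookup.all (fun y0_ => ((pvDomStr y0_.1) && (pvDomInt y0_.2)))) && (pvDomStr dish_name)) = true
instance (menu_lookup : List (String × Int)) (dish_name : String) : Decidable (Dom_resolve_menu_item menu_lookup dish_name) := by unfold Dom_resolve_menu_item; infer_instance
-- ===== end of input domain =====

-- B replaces A's two scans of the menu with one pass that casefolds each name once,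
-- returns an exact match eagerly and keeps the first substring match as a post-loop candidate.


-- ===== PORT A =====
-- first loop of A: return the first entry whose casefolded name equals `q`
def pvFindExact : List (String × Int) → String → Option (String × Int)
  | [], _ => none
  | (n, p) :: rest, q =>
      if PySem.Str.lower n = q then some (n, p) else pvFindExact rest q

-- second loop of A: return the first entry whose casefolded name contains nonempty `q`
def pvFindSub : List (String × Int) → String → Option (String × Int)
  | [], _ => none
  | (n, p) :: rest, q =>
      if q ≠ "" ∧ PySem.Str.isIn q (PySem.Str.lower n) = true then some (n, p)
      else pvFindSub rest q

-- casefold is ported as PySem.Str.lower, exact on the ASCII domain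
def resolve_menu_item (menu_lookup : List (String × Int)) (dish_name : String) : Option String × Option Int :=
  let normalized := PySem.Str.lower (PySem.Str.strip dish_name)
  match pvFindExact menu_lookup normalized with
  | some (n, p) => (some n, some p)
  | none =>
    match pvFindSub menu_lookup normalized with
    | some (n, p) => (some n, some p)
    | none => (none, none)

-- ===== PORT B =====
-- single pass: exact match returns immediately; first substring match is saved in `cand`
def pvLoopB : List (String × Int) → String → Option (String × Int) → Option String × Option Int
  | [], _, cand =>
    match cand with
    | some (n, p) => (some n, some p)
    | none => (none, none)
  | (n, p) :: rest, q, cand =>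
    let folded := PySem.Str.lower n
    if folded = q then (some n, some p)
    else
      pvLoopB rest q
        (if cand = none ∧ q ≠ "" ∧ PySem.Str.isIn q folded = true then some (n, p) else cand)

def resolve_menu_item_alt (menu_lookup : List (String × Int)) (dish_name : String) : Option String × Option Int :=
  pvLoopB menu_lookup (PySem.Str.lower (PySem.Str.strip dish_name)) none

-- ===== PRECONDITION & SPEC =====
def Spec_resolve_menu_item (menu_lookup : List (String × Int)) (dish_name : String) (out : Option String × Option Int) : Prop := out = resolve_menu_item_alt menu_lookup dish_name
instance (menu_lookup : List (String × Int)) (dish_name : String) (out : Option String × Option Int) : Decidable (Spec_resolve_menu_item menu_lookup dish_name out) := by unfold Spec_resolve_menu_item; infer_instance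

-- ===== CLAIM (what is proved, stated in full; the proofs are below) =====
def Claim_equal_resolve_menu_item : Prop := ∀ (menu_lookup : List (String × Int)) (dish_name : String), Dom_resolve_menu_item menu_lookup dish_name → Spec_resolve_menu_item menu_lookup dish_name (resolve_menu_item menu_lookup dish_name)

-- ===== LEMMAS AND PROOFS =====
-- Loop invariant for B: the single pass with saved candidate `cand` equals
-- "first exact match, else cand, else first substring match".
theorem pvLoopB_eq (m : List (String × Int)) (q : String) (cand : Option (String × Int)) :
    pvLoopB m q cand =
      match pvFindExact m q with
      | some (n, p) => (some n, some p)
      | none =>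
        match (match cand with | some c => some c | none => pvFindSub m q) with
        | some (n, p) => (some n, some p)
        | none => (none, none) := by
  induction m generalizing cand with
  | nil => cases cand <;> simp [pvLoopB, pvFindExact, pvFindSub]
  | cons hd tl ih =>
    obtain ⟨n, p⟩ := hd
    by_cases hx : PySem.Str.lower n = q
    · simp [pvLoopB, pvFindExact, hx]
    · cases cand with
      | none =>
        simp only [pvLoopB, pvFindExact, pvFindSub, hx, if_false, ih]
        split_ifs <;> simp_all
      | some c => simp [pvLoopB, pvFindExact, hx, ih]

-- ===== VERDICT (by name: the statement is the Claim_ definition above) =====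
theorem resolve_menu_item_spec : Claim_equal_resolve_menu_item := by
  intro menu_lookup dish_name _
  unfold Spec_resolve_menu_item resolve_menu_item resolve_menu_item_alt
  rw [pvLoopB_eq]
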